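-- pv_equiv track=rewrite | github.com/schwa456/MatchSumFood | BertExt/src/model/utils.py | ngram_blocking
-- ===== SOURCE A (Python) =====
-- from typing import Optional, List
--
-- def get_ngrams(
--         tokens: List[str],
--         n: int,
-- ):
--     """
--         주어진 토큰 리스트에사 n-gram 집합을 생성
--     """
--     ngrams = set()
--     num = len(tokens) - n
--     for i in range(num + 1):
--         ngrams.add(tuple(tokens[i:i + n]))
--     return ngrams
--
-- def ngram_blocking(
--         sent: str, # 새로 고려 중인 문장
--         can_sum: List[str], # 현재까지 선택된 요약 문장 리스트
--         ngram: int, # 중복을 차단할 n-gram 크기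
-- ):
--     """
--         주어진 문장이 현재까지 선택된 문장들과 n-gram이 중복되는지 확인
--     """
--     sent_tri = get_ngrams(sent.split(), ngram)
--     for can_sent in can_sum:
--         can_tri = get_ngrams(can_sent.split(), ngram)
--         if len(sent_tri.intersection(can_tri)) > 0:
--             return True # 중복이 있으면 True 반환
--     # 중복이 없으면 False 반환
--     return False
-- ===== SOURCE B (Python) =====
-- from typing import List
--
-- def get_ngrams(tokens: List[str], n: int):
--     ngrams = set()
--     num = len(tokens) - n
--     for i in range(num + 1):
--         ngrams.add(tuple(tokens[i:i + n]))
--     return ngrams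
--
-- def ngram_blocking(sent: str, can_sum: List[str], ngram: int):
--     sent_tri = get_ngrams(sent.split(), ngram)
--     all_can = set()
--     for can_sent in can_sum:
--         all_can.update(get_ngrams(can_sent.split(), ngram))
--     return not sent_tri.isdisjoint(all_can)
-- ===== Notes on version B (the rewrite author's own statement) =====
-- stated objective: alternative
-- what changed: Replaced the per-candidate intersection loop with early return by building one combined set of all candidate n-grams and finishing with a single disjointness test.
import Mathlib
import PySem

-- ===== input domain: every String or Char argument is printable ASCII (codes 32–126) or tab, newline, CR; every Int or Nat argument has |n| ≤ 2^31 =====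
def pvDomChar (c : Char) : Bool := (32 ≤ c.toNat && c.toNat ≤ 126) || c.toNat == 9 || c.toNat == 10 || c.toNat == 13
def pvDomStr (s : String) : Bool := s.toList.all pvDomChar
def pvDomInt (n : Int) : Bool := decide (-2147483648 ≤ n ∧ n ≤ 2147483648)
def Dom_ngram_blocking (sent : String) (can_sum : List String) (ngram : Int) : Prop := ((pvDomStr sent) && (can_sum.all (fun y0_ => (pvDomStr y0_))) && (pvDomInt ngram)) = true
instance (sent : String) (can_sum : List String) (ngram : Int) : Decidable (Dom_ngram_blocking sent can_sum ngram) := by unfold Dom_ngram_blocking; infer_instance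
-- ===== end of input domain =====

-- B keeps get_ngrams but builds ONE combined set of all candidate n-grams and ends with a
-- single disjointness test instead of A's per-candidate intersection loop with early return
-- (alternative decomposition; same cost).

-- ===== PORT A =====
-- shared helper: literal port of get_ngrams (identical in Source A and Source B)
def get_ngrams (tokens : List String) (n : Int) : PySem.Set (List String) :=
  let num : Int := (tokens.length : Int) - n
  (PySem.List.pyRange 0 (num + 1) 1).foldl
    (fun s i => PySem.Set.add s (PySem.List.slice tokens (some i) (some (i + n))))
    PySem.Set.empty

-- A's for-loop with early 'return True'
def ngram_blocking_loop (sent_tri : PySem.Set (List String)) (ngram : Int) : List String → Bool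
  | [] => false
  | can_sent :: rest =>
      let can_tri := get_ngrams (PySem.Str.split₀ can_sent) ngram
      if PySem.Set.len (PySem.Set.inter sent_tri can_tri) > 0 then true
      else ngram_blocking_loop sent_tri ngram rest

def ngram_blocking (sent : String) (can_sum : List String) (ngram : Int) : Bool :=
  let sent_tri := get_ngrams (PySem.Str.split₀ sent) ngram
  ngram_blocking_loop sent_tri ngram can_sum

-- ===== PORT B =====
def ngram_blocking_alt (sent : String) (can_sum : List String) (ngram : Int) : Bool :=
  let sent_tri := get_ngrams (PySem.Str.split₀ sent) ngram
  let all_can := can_sum.foldl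
    (fun s can_sent => PySem.Set.update s (get_ngrams (PySem.Str.split₀ can_sent) ngram))
    PySem.Set.empty
  !(PySem.Set.isdisjoint sent_tri all_can)

-- ===== PRECONDITION & SPEC =====
def Spec_ngram_blocking (sent : String) (can_sum : List String) (ngram : Int) (out : Bool) : Prop := out = ngram_blocking_alt sent can_sum ngram
instance (sent : String) (can_sum : List String) (ngram : Int) (out : Bool) : Decidable (Spec_ngram_blocking sent can_sum ngram out) := by unfold Spec_ngram_blocking; infer_instance

-- ===== CLAIM (what is proved, stated in full; the proofs are below) =====
def Claim_equal_ngram_blocking : Prop := ∀ (sent : String) (can_sum : List String) (ngram : Int), Dom_ngram_blocking sent can_sum ngram → Spec_ngram_blocking sent can_sum ngram (ngram_blocking sent can_sum ngram)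

-- ===== LEMMAS AND PROOFS =====

-- A's loop returns true iff some candidate shares an n-gram with sent_tri
theorem loop_eq_true_iff (st : PySem.Set (List String)) (n : Int) (l : List String) :
    ngram_blocking_loop st n l = true ↔
      ∃ c ∈ l, ∃ x ∈ st, x ∈ get_ngrams (PySem.Str.split₀ c) n := by
  induction l with
  | nil => simp [ngram_blocking_loop]
  | cons c rest ih =>
      simp only [ngram_blocking_loop]
      by_cases h : PySem.Set.len (PySem.Set.inter st (get_ngrams (PySem.Str.split₀ c) n)) > 0
      · rw [if_pos h]
        have hne : PySem.Set.inter st (get_ngrams (PySem.Str.split₀ c) n) ≠ [] := by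
          intro he
          simp [PySem.Set.len, he] at h
        obtain ⟨x, hx⟩ := List.exists_mem_of_ne_nil _ hne
        rw [PySem.Set.mem_inter] at hx
        simp only [true_iff]
        exact ⟨c, by simp, x, hx.1, hx.2⟩
      · rw [if_neg h, ih]
        constructor
        · rintro ⟨d, hd, x, hxs, hxd⟩; exact ⟨d, List.mem_cons_of_mem _ hd, x, hxs, hxd⟩
        · rintro ⟨d, hd, x, hxs, hxd⟩
          rcases List.mem_cons.mp hd with rfl | hd'
          · exfalso; apply h
            have hx : x ∈ PySem.Set.inter st (get_ngrams (PySem.Str.split₀ d) n) :=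
              (PySem.Set.mem_inter _ _ _).mpr ⟨hxs, hxd⟩
            have hlen : 0 < (PySem.Set.inter st (get_ngrams (PySem.Str.split₀ d) n)).length :=
              List.length_pos_of_mem hx
            simp only [PySem.Set.len]
            exact_mod_cast hlen
          · exact ⟨d, hd', x, hxs, hxd⟩

-- membership in B's combined set
theorem mem_all_can (n : Int) (l : List String) (s : PySem.Set (List String)) (x : List String) :
    x ∈ l.foldl (fun s c => PySem.Set.update s (get_ngrams (PySem.Str.split₀ c) n)) s ↔
      x ∈ s ∨ ∃ c ∈ l, x ∈ get_ngrams (PySem.Str.split₀ c) n := by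
  induction l generalizing s with
  | nil => simp
  | cons c rest ih =>
      simp only [List.foldl_cons, ih, PySem.Set.mem_update, List.mem_cons]
      constructor
      · rintro ((h | h) | ⟨d, hd, hx⟩)
        · exact Or.inl h
        · exact Or.inr ⟨c, Or.inl rfl, h⟩
        · exact Or.inr ⟨d, Or.inr hd, hx⟩
      · rintro (h | ⟨d, rfl | hd, hx⟩)
        · exact Or.inl (Or.inl h)
        · exact Or.inl (Or.inr hx)
        · exact Or.inr ⟨d, hd, hx⟩

-- ===== VERDICT (by name: the statement is the Claim_ definition above) =====
theorem ngram_blocking_spec : Claim_equal_ngram_blocking := by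
  intro sent can_sum ngram _
  unfold Spec_ngram_blocking ngram_blocking ngram_blocking_alt
  rw [Bool.eq_iff_iff]
  simp only [loop_eq_true_iff, Bool.not_eq_eq_eq_not, Bool.not_true, ← Bool.not_eq_true,
    PySem.Set.isdisjoint_iff]
  push Not
  constructor
  · rintro ⟨c, hc, x, hxs, hxc⟩
    exact ⟨x, hxs, (mem_all_can ngram can_sum PySem.Set.empty x).mpr (Or.inr ⟨c, hc, hxc⟩)⟩
  · rintro ⟨x, hxs, hx⟩
    rcases (mem_all_can ngram can_sum PySem.Set.empty x).mp hx with h0 | ⟨c, hc, hxc⟩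
    · cases h0
    · exact ⟨c, hc, x, hxs, hxc⟩
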